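-- pv_equiv track=rewrite | github.com/laiw12/Duke_CS570_Artificial_Intelligence | CS570AI_Fall17/hw1/15puzzle.py | lowfscore
-- ===== SOURCE A (Python) =====
-- def lowfscore(openset):
--     scorelist = [-5 for x in range(len(openset))]
--     for i  in range(len(openset)):
--         scorelist[i] = openset[i][1]
--
--     a = min(scorelist)
--     for i in range(len(scorelist)):
--         if a == scorelist[i]:
--             return openset[i]
-- ===== SOURCE B (Python) =====
-- def lowfscore(openset):
--     best = openset[0]
--     for item in openset[1:]:
--         if item[1] < best[1]:
--             best = item
--     return best
-- ===== Notes on version B (the rewrite author's own statement) =====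
-- stated objective: simpler
-- what changed: Replaces the three-phase body (build a parallel score list, take its min, re-scan for the first matching index) with one explicit pass that keeps the current best element, updating only on strict <, which preserves the first-occurrence tie behaviour.
-- outside the precondition, e.g. on lowfscore([]): A raises ValueError, B raises IndexError
import Mathlib
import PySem

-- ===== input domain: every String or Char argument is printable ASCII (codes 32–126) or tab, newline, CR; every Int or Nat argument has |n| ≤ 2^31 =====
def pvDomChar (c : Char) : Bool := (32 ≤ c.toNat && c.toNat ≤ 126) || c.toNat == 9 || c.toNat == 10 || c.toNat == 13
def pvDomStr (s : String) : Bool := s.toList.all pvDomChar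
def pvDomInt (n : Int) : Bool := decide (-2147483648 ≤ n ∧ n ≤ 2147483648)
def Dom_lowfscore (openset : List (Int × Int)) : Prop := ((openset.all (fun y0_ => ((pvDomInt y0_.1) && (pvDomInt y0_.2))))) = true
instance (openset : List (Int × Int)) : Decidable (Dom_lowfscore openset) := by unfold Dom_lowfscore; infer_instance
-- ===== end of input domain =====

-- B replaces A's three-phase body (parallel score list, min, re-scan for first match)
-- with one explicit pass keeping the current best (strict <); simpler, same behaviour.
-- Pre_ excludes the empty list, on which Python A raises ValueError (min of empty sequence).


-- ===== PORT A =====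
-- scorelist = [-5 ...]; scorelist[i] = openset[i][1]; a = min(scorelist); first i with a == scorelist[i]
def lowfscore (openset : List (Int × Int)) : Int × Int :=
  let n : Int := openset.length
  let scorelist0 : List Int := (PySem.List.pyRange 0 n 1).map (fun _ => (-5 : Int))
  let scorelist : List Int := (PySem.List.pyRange 0 n 1).foldl
      (fun sl i => sl.set i.toNat (PySem.List.pyGetD openset i ((0 : Int), (0 : Int))).2) scorelist0
  match PySem.List.min? scorelist (fun y => y) with
  | none => (0, 0)   -- Python raises ValueError here (empty openset); outside Pre_
  | some a =>
    match (PySem.List.pyRange 0 n 1).find? (fun i => a == PySem.List.pyGetD scorelist i 0) with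
    | some i => PySem.List.pyGetD openset i ((0 : Int), (0 : Int))
    | none => (0, 0)  -- Python falls off the loop returning None; unreachable when openset ≠ []

-- ===== PORT B =====
-- best = openset[0]; for item in openset[1:]: if item[1] < best[1]: best = item; return best
def lowfscore_alt (openset : List (Int × Int)) : Int × Int :=
  let best := PySem.List.pyGetD openset 0 ((0 : Int), (0 : Int))
  (PySem.List.slice openset (some 1) none).foldl
    (fun best item => if item.2 < best.2 then item else best) best

-- ===== PRECONDITION & SPEC =====
-- Pre_ excludes only the empty list: Python A raises ValueError there (min of empty), B raises IndexError.
def Pre_lowfscore (openset : List (Int × Int)) : Prop := openset ≠ []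
instance (openset : List (Int × Int)) : Decidable (Pre_lowfscore openset) := by unfold Pre_lowfscore; infer_instance
def pvWitness_lowfscore : (List (Int × Int)) := [(3, 7), (4, 2), (5, 2)]
def Spec_lowfscore (openset : List (Int × Int)) (out : Int × Int) : Prop := out = lowfscore_alt openset
instance (openset : List (Int × Int)) (out : Int × Int) : Decidable (Spec_lowfscore openset out) := by unfold Spec_lowfscore; infer_instance

-- ===== CLAIM (what is proved, stated in full; the proofs are below) =====
def Claim_equal_lowfscore : Prop := ∀ (openset : List (Int × Int)), Dom_lowfscore openset → Pre_lowfscore openset → Spec_lowfscore openset (lowfscore openset)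

-- ===== LEMMAS AND PROOFS =====

-- the write loop fills init with g 0, …, g (n-1)
theorem pv_setfold (g : Int → Int) : ∀ (n : ℕ) (init : List Int), n ≤ init.length →
    (PySem.List.pyRange 0 (n : Int) 1).foldl (fun sl i => sl.set i.toNat (g i)) init
    = List.map (fun (k : ℕ) => g ((k : Int))) (List.range n) ++ init.drop n := by
  intro n
  induction n with
  | zero => intro init _; simp [PySem.List.pyRange_one_eq_nil]
  | succ n ih =>
    intro init hlen
    have hcast : ((n + 1 : ℕ) : Int) = (n : Int) + 1 := by push_cast; ring
    rw [hcast, PySem.List.pyRange_one_succ_right (by positivity), List.foldl_append,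
        ih init (by omega)]
    simp only [List.foldl_cons, List.foldl_nil, Int.toNat_natCast]
    rw [List.set_append]
    have hml : (List.map (fun (k : ℕ) => g ((k : Int))) (List.range n)).length = n := by simp
    rw [hml]
    simp only [lt_irrefl, if_false, Nat.sub_self]
    obtain ⟨y, ys, hdrop⟩ : ∃ y ys, init.drop n = y :: ys := by
      cases hd : init.drop n with
      | nil => exfalso; have := List.length_drop (l := init) (i := n); rw [hd] at this; simp at this; omega
      | cons y ys => exact ⟨y, ys, rfl⟩
    have hdrop1 : init.drop (n + 1) = ys := by
      have : init.drop (n + 1) = (init.drop n).tail := by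
        rw [← List.drop_drop]; simp
      rw [this, hdrop]; rfl
    rw [hdrop, hdrop1]
    simp [List.range_succ]

-- scorelist(l) = l.map Prod.snd
theorem pv_scorelist (l : List (Int × Int)) :
    (PySem.List.pyRange 0 (l.length : Int) 1).foldl
      (fun sl i => sl.set i.toNat (PySem.List.pyGetD l i ((0 : Int), (0 : Int))).2)
      ((PySem.List.pyRange 0 (l.length : Int) 1).map (fun _ => (-5 : Int)))
    = l.map Prod.snd := by
  rw [pv_setfold (fun i => (PySem.List.pyGetD l i ((0 : Int), (0 : Int))).2) l.length
       _ (by simp [PySem.List.pyRange_one]),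
      List.drop_eq_nil_of_le (by simp [PySem.List.pyRange_one])]
  rw [List.append_nil]
  apply List.ext_getElem (by simp)
  intro k h1 h2
  have hk : k < l.length := by simpa using h2
  simp [PySem.List.pyGetD_natCast, List.getD, hk]

-- the index search over range(len) is find? over the list itself
theorem pv_findrange (a : Int) : ∀ (l : List (Int × Int)),
    (((List.range l.length).find? (fun k => a == (l.map Prod.snd).getD k 0)).map
      (fun k => l.getD k ((0 : Int), (0 : Int))))
    = l.find? (fun p => a == p.2) := by
  intro l
  induction l with
  | nil => simp
  | cons x t ih =>
    rw [List.length_cons, List.range_succ_eq_map]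
    by_cases hx : a = x.2
    · simp [hx, List.getD]
    · have hxb : (a == x.2) = false := by simp [hx]
      have h0 : (a == ((x :: t).map Prod.snd).getD 0 0) = false := by
        simp [List.getD, hx]
      simp only [List.find?_cons, h0, hxb]
      rw [List.find?_map, Option.map_map]
      have hfun : ((fun k => a == ((x :: t).map Prod.snd).getD k 0) ∘ Nat.succ)
          = (fun k => a == (t.map Prod.snd).getD k 0) := by
        funext k; simp [List.getD]
      rw [hfun]
      have hfun2 : ((fun k => (x :: t).getD k ((0 : Int), (0 : Int))) ∘ Nat.succ)
          = (fun k => t.getD k ((0 : Int), (0 : Int))) := by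
        funext k; simp [List.getD]
      calc Option.map ((fun k => (x :: t).getD k ((0 : Int), (0 : Int))) ∘ Nat.succ)
              (List.find? (fun k => a == (t.map Prod.snd).getD k 0) (List.range t.length))
          = Option.map (fun k => t.getD k ((0 : Int), (0 : Int)))
              (List.find? (fun k => a == (t.map Prod.snd).getD k 0) (List.range t.length)) := by
            rw [hfun2]
        _ = t.find? (fun p => a == p.2) := ih

-- first element attaining the overall minimum = strict-< running-best fold
theorem pv_foldEq (a : Int) : ∀ (t : List (Int × Int)) (x : Int × Int),
    (a = x.2 ∨ ∃ p ∈ t, p.2 = a) → a ≤ x.2 → (∀ p ∈ t, a ≤ p.2) →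
    (((x :: t).find? (fun p => a == p.2)).getD ((0 : Int), (0 : Int)))
    = t.foldl (fun best item => if item.2 < best.2 then item else best) x := by
  intro t
  induction t with
  | nil =>
    intro x hw hx _
    have : a = x.2 := by rcases hw with h | ⟨p, hp, _⟩; exact h; simp at hp
    simp [this]
  | cons y t' ih =>
    intro x hw hx hall
    have hy : a ≤ y.2 := hall y (by simp)
    have hall' : ∀ p ∈ t', a ≤ p.2 := fun p hp => hall p (by simp [hp])
    simp only [List.foldl_cons]
    by_cases hxa : a = x.2
    · -- head already attains the min; the fold keeps x throughout
      have hyx : ¬ y.2 < x.2 := by omega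
      rw [if_neg hyx]
      have := ih x (Or.inl hxa) hx hall'
      rw [← this]
      simp [hxa]
    · have hxb : (a == x.2) = false := by simp [hxa]
      have hxlt : a < x.2 := lt_of_le_of_ne hx hxa
      by_cases hya : a = y.2
      · have hylt : y.2 < x.2 := by omega
        rw [if_pos hylt]
        have := ih y (Or.inl hya) hy hall'
        rw [← this]
        have hyb : (a == y.2) = true := by simp [hya]
        simp [hxb, hyb]
      · have hw' : a = (if y.2 < x.2 then y else x).2 ∨ ∃ p ∈ t', p.2 = a := by
          rcases hw with h | ⟨p, hp, hpa⟩
          · exact absurd h hxa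
          · rcases List.mem_cons.mp hp with h | h
            · exact absurd (h ▸ hpa).symm hya
            · exact Or.inr ⟨p, h, hpa⟩
        have hx' : a ≤ (if y.2 < x.2 then y else x).2 := by split_ifs <;> assumption
        have := ih (if y.2 < x.2 then y else x) hw' hx' hall'
        rw [← this]
        have hyb : (a == y.2) = false := by simp [hya]
        simp only [List.find?_cons, hxb, hyb]
        split_ifs with h
        · simp [hyb]
        · simp [hxb]

-- ===== VERDICT (by name: the statement is the Claim_ definition above) =====
theorem lowfscore_spec : Claim_equal_lowfscore := by
  intro openset _ hpre
  obtain ⟨x, t, rfl⟩ : ∃ x t, openset = x :: t := by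
    cases openset with
    | nil => exact absurd rfl hpre
    | cons x t => exact ⟨x, t, rfl⟩
  unfold Spec_lowfscore lowfscore lowfscore_alt
  simp only [pv_scorelist]
  have hmap : (x :: t).map Prod.snd = x.2 :: t.map Prod.snd := rfl
  rw [hmap, PySem.List.min?_id_cons]
  set a : Int := (t.map Prod.snd).foldl min x.2 with ha
  dsimp only
  -- rewrite the pyRange find? into find? over the list
  have hrange : PySem.List.pyRange 0 ((x :: t).length : Int) 1
      = (List.range (x :: t).length).map (fun k => ((k : ℕ) : Int)) := by
    rw [PySem.List.pyRange_one]; simp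
  rw [hrange, List.find?_map]
  have hfun : ((fun i => a == PySem.List.pyGetD (x.2 :: t.map Prod.snd) i 0) ∘ (fun k => ((k : ℕ) : Int)))
      = (fun k => a == ((x :: t).map Prod.snd).getD k 0) := by
    funext k
    simp [PySem.List.pyGetD_natCast, hmap]
  rw [hfun]
  -- facts about a
  have hle := PySem.List.foldl_min_le (t.map Prod.snd) x.2
  have hmem := PySem.List.foldl_min_mem (t.map Prod.snd) x.2
  have hx : a ≤ x.2 := hle.1
  have hall : ∀ p ∈ t, a ≤ p.2 := fun p hp => hle.2 p.2 (List.mem_map_of_mem hp)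
  have hw : a = x.2 ∨ ∃ p ∈ t, p.2 = a := by
    rcases hmem with h | h
    · exact Or.inl h
    · obtain ⟨p, hp, hpa⟩ := List.mem_map.mp h
      exact Or.inr ⟨p, hp, hpa⟩
  have hfind := pv_findrange a (x :: t)
  have hfold := pv_foldEq a t x hw hx hall
  -- B side: slice [1:] is tail, openset[0] is x
  rw [PySem.List.slice_from_one]
  simp only [List.tail_cons, PySem.List.pyGetD_zero_cons]
  -- A side: case on the find? over range
  cases hfr : (List.range (x :: t).length).find? (fun k => a == ((x :: t).map Prod.snd).getD k 0) with
  | none =>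
    exfalso
    rw [hfr] at hfind
    have : (x :: t).find? (fun p => a == p.2) = none := by simpa using hfind.symm
    have hnone := List.find?_eq_none.mp this
    rcases hw with h | ⟨p, hp, hpa⟩
    · exact (by simpa [h] using hnone x (by simp))
    · exact (by simpa [hpa] using hnone p (by simp [hp]))
  | some i =>
    rw [hfr] at hfind
    simp only [Option.map_some] at hfind
    have hi : i < (x :: t).length := by
      have := List.find?_some hfr
      have hmemi := List.mem_range.mp (List.mem_of_find?_eq_some hfr)
      exact hmemi
    simp only [Option.map_some, PySem.List.pyGetD_natCast]
    rw [show ((x :: t).getD i ((0 : Int), (0 : Int))) = ((x :: t).find? (fun p => a == p.2)).getD ((0 : Int), (0 : Int)) from by rw [← hfind]; simp, hfold]
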